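-- pv_equiv track=rewrite | github.com/sinamajidian/Hap10 | utilities/splitter.py | split_frg
-- ===== SOURCE A (Python) =====
-- def split_frg(indices_clusters_segments, list_segments, qualities):
--     """ splitting a fragment based on the clustered indecis
--
--     input: a fragment dictionary and a list of indices for each cluster={[1,2,3], [4,5,6],...  ]
--     output: a list of list, inner list for each cluster  [[[(1, '00')], 'BB'], [[(32, '010')], 'AAA']]
--
--     """
--     list_fragment_splitted=[]
--
--     accumulated_length = 0
--     for cluster_id, indices_cluster_segments in enumerate(indices_clusters_segments):
--
--         segments_cluster = [list_segments[i] for i in indices_cluster_segments]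
--
--         length_this_cluster = sum([len(segment[1]) for segment in segments_cluster])
--
--         quality_cluster = qualities[accumulated_length:accumulated_length+length_this_cluster]
--         accumulated_length += length_this_cluster
--
--         list_fragment_splitted.append([segments_cluster, quality_cluster])
--
--     return list_fragment_splitted
-- ===== SOURCE B (Python) =====
-- def split_frg(indices_clusters_segments, list_segments, qualities):
--     # Three phases: gather per-cluster segment lists, compute their lengths,
--     # turn the lengths into explicit prefix offsets, then assemble by zipping
--     # each segment list with its quality slice (no running accumulator in the
--     # assembly loop).
--     segments_clusters = [[list_segments[i] for i in idxs]
--                          for idxs in indices_clusters_segments]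
--     lengths = [sum(len(seg[1]) for seg in sc) for sc in segments_clusters]
--     offsets = [0]
--     for l in lengths:
--         offsets.append(offsets[-1] + l)
--     return [[sc, qualities[a:b]]
--             for sc, a, b in zip(segments_clusters, offsets, offsets[1:])]
-- ===== Notes on version B (the rewrite author's own statement) =====
-- stated objective: alternative
-- what changed: Replaced A's single interleaved loop with a mutable running offset by three phases: build per-cluster segment lists, compute their lengths, turn lengths into an explicit prefix-offset boundary list, then assemble the output by zipping segment lists with quality slices.
import Mathlib
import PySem

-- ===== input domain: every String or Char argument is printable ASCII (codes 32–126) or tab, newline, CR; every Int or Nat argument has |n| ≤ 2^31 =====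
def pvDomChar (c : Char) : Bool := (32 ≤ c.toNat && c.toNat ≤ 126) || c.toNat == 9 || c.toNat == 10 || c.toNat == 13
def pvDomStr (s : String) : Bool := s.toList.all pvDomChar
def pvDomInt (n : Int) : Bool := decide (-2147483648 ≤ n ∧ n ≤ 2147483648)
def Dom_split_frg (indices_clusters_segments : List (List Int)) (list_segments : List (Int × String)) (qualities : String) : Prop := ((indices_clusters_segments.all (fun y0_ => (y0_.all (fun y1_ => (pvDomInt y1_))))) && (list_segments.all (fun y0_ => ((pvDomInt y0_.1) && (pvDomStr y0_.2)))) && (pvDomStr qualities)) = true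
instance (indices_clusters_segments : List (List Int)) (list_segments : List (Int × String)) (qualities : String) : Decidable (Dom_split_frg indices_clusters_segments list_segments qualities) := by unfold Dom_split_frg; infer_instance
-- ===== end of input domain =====

-- B replaces A's interleaved loop with a running offset by three phases (segment lists, lengths,
-- explicit prefix-offset boundaries, then slice assembly by zipping): alternative decomposition, same cost.

-- ===== PORT A =====
-- A's single loop: running accumulated_length, append [segments_cluster, quality_cluster] each step.
def split_frg (indices_clusters_segments : List (List Int)) (list_segments : List (Int × String)) (qualities : String) : List ((List (Int × String)) × String) :=
  (indices_clusters_segments.foldl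
    (fun (st : Int × List ((List (Int × String)) × String)) (indices_cluster_segments : List Int) =>
      let segments_cluster := indices_cluster_segments.map
        (fun i => (PySem.List.pyGet? list_segments i).getD (0, ""))
      let length_this_cluster := (segments_cluster.map (fun seg => PySem.Str.len seg.2)).sum
      let quality_cluster := PySem.Str.slice qualities (some st.1) (some (st.1 + length_this_cluster))
      (st.1 + length_this_cluster, st.2 ++ [(segments_cluster, quality_cluster)]))
    ((0 : Int), ([] : List ((List (Int × String)) × String)))).2

-- ===== PORT B =====
-- B's three phases: per-cluster segment lists, lengths, prefix offsets (the offsets loop is a scanl),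
-- then zip each segment list with its (start, end) boundary pair and slice.
def split_frg_alt (indices_clusters_segments : List (List Int)) (list_segments : List (Int × String)) (qualities : String) : List ((List (Int × String)) × String) :=
  let segments_clusters := indices_clusters_segments.map
    (fun idxs => idxs.map (fun i => (PySem.List.pyGet? list_segments i).getD (0, "")))
  let lengths := segments_clusters.map (fun sc => (sc.map (fun seg => PySem.Str.len seg.2)).sum)
  let offsets := lengths.scanl (· + ·) (0 : Int)
  (segments_clusters.zip (offsets.zip offsets.tail)).map
    (fun p => (p.1, PySem.Str.slice qualities (some p.2.1) (some p.2.2)))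

-- ===== PRECONDITION & SPEC =====
-- Pre_ excludes exactly the inputs where Python A raises IndexError: some cluster index out of range.
def Pre_split_frg (indices_clusters_segments : List (List Int)) (list_segments : List (Int × String)) (qualities : String) : Prop :=
  ∀ idxs ∈ indices_clusters_segments, ∀ i ∈ idxs, PySem.Raise.InRange list_segments.length i
instance (indices_clusters_segments : List (List Int)) (list_segments : List (Int × String)) (qualities : String) : Decidable (Pre_split_frg indices_clusters_segments list_segments qualities) := by unfold Pre_split_frg; infer_instance

def pvWitness_split_frg : List (List Int) × (List (Int × String)) × String :=
  ([[0, 1], [-1]], [(1, "ab"), (2, "c")], "xyz")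

def Spec_split_frg (indices_clusters_segments : List (List Int)) (list_segments : List (Int × String)) (qualities : String) (out : List ((List (Int × String)) × String)) : Prop := out = split_frg_alt indices_clusters_segments list_segments qualities
instance (indices_clusters_segments : List (List Int)) (list_segments : List (Int × String)) (qualities : String) (out : List ((List (Int × String)) × String)) : Decidable (Spec_split_frg indices_clusters_segments list_segments qualities out) := by unfold Spec_split_frg; infer_instance

-- ===== CLAIM (what is proved, stated in full; the proofs are below) =====
def Claim_equal_split_frg : Prop := ∀ (indices_clusters_segments : List (List Int)) (list_segments : List (Int × String)) (qualities : String), Dom_split_frg indices_clusters_segments list_segments qualities → Pre_split_frg indices_clusters_segments list_segments qualities → Spec_split_frg indices_clusters_segments list_segments qualities (split_frg indices_clusters_segments list_segments qualities)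

-- ===== LEMMAS AND PROOFS =====

-- B's three-phase build, parametrised by the starting offset (needed for the induction).
def pvBuildB (list_segments : List (Int × String)) (qualities : String)
    (ics : List (List Int)) (s : Int) : List ((List (Int × String)) × String) :=
  let segs := ics.map (fun idxs => idxs.map (fun i => (PySem.List.pyGet? list_segments i).getD (0, "")))
  let lens := segs.map (fun sc => (sc.map (fun seg => PySem.Str.len seg.2)).sum)
  let offs := lens.scanl (· + ·) s
  (segs.zip (offs.zip offs.tail)).map
    (fun p => (p.1, PySem.Str.slice qualities (some p.2.1) (some p.2.2)))

theorem pv_loop_eq (list_segments : List (Int × String)) (qualities : String) :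
    ∀ (ics : List (List Int)) (s : Int) (acc : List ((List (Int × String)) × String)),
      (ics.foldl
        (fun (st : Int × List ((List (Int × String)) × String)) (idxs : List Int) =>
          let sc := idxs.map (fun i => (PySem.List.pyGet? list_segments i).getD (0, ""))
          let L := (sc.map (fun seg => PySem.Str.len seg.2)).sum
          let qc := PySem.Str.slice qualities (some st.1) (some (st.1 + L))
          (st.1 + L, st.2 ++ [(sc, qc)]))
        (s, acc)).2 = acc ++ pvBuildB list_segments qualities ics s := by
  intro ics
  induction ics with
  | nil => intro s acc; simp [pvBuildB]
  | cons idxs rest ih =>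
    intro s acc
    simp only [List.foldl_cons]
    rw [ih]
    cases rest with
    | nil => simp [pvBuildB]
    | cons r rs => simp [pvBuildB, List.scanl_cons, add_assoc]

theorem split_frg_eq_alt (ics : List (List Int)) (ls : List (Int × String)) (q : String) :
    split_frg ics ls q = split_frg_alt ics ls q := by
  unfold split_frg split_frg_alt
  rw [pv_loop_eq]
  simp [pvBuildB]

-- ===== VERDICT (by name: the statement is the Claim_ definition above) =====
theorem split_frg_spec : Claim_equal_split_frg := by
  intro ics ls q _ _
  unfold Spec_split_frg
  exact split_frg_eq_alt ics ls q
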